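-- pv_equiv track=rewrite | github.com/mgtezak/Advent-of-Code-Puzzle-Solver | lib/solutions/aoc2023.py | aoc2023_day10_part1
-- ===== SOURCE A (Python) =====
-- def aoc2023_day10_part1(puzzle_input):
--
--     grid = puzzle_input.split()
--     graph = {}
--     for x, line in enumerate(grid):
--         for y, tile in enumerate(line):
--             adjacent = []
--             if tile in '-J7S':
--                 adjacent.append((x, y-1))
--             if tile in '-FLS':
--                 adjacent.append((x, y+1))
--             if tile in '|F7S':
--                 adjacent.append((x+1, y))
--             if tile in '|LJS':
--                 adjacent.append((x-1, y))
--             if tile == 'S':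
--                 visited = set([(x, y)])
--                 q = set([(x, y)])
--             graph[(x, y)] = adjacent
--
--     steps = -1
--     while q:
--         nxt = set()
--         for x1, y1 in q:
--             for x2, y2 in graph[(x1, y1)]:
--                 if (x2, y2) not in visited and (x1, y1) in graph.get((x2, y2), []):
--                     nxt.add((x2, y2))
--                     visited.add((x2, y2))
--         q = nxt
--         steps += 1
--
--     return steps
-- ===== SOURCE B (Python) =====
-- def aoc2023_day10_part1(puzzle_input):
--     grid = puzzle_input.split()
--
--     def neighbors(x, y):
--         if not (0 <= x < len(grid) and 0 <= y < len(grid[x])):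
--             return []
--         t = grid[x][y]
--         out = []
--         if t in '-J7S':
--             out.append((x, y - 1))
--         if t in '-FLS':
--             out.append((x, y + 1))
--         if t in '|F7S':
--             out.append((x + 1, y))
--         if t in '|LJS':
--             out.append((x - 1, y))
--         return out
--
--     start = None
--     for x, line in enumerate(grid):
--         for y, tile in enumerate(line):
--             if tile == 'S':
--                 start = (x, y)
--
--     # region-growing fixpoint: repeatedly absorb every cell mutually
--     # connected to the region; the number of growth rounds is the
--     # farthest distance from the start.
--     region = {start}
--     rounds = 0
--     while True:
--         fresh = {w for v in region for w in neighbors(*v)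
--                  if w not in region and v in neighbors(*w)}
--         if not fresh:
--             return rounds
--         region |= fresh
--         rounds += 1
-- ===== Notes on version B (the rewrite author's own statement) =====
-- stated objective: alternative
-- what changed: B drops A's precomputed adjacency dictionary and layered frontier BFS entirely: it recomputes mutual pipe connections directly from the grid tiles and grows the visited region as a monotone fixpoint (absorbing all mutually-connected neighbours of the whole region each round), counting growth rounds, which equals A's farthest BFS distance.
import Mathlib
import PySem

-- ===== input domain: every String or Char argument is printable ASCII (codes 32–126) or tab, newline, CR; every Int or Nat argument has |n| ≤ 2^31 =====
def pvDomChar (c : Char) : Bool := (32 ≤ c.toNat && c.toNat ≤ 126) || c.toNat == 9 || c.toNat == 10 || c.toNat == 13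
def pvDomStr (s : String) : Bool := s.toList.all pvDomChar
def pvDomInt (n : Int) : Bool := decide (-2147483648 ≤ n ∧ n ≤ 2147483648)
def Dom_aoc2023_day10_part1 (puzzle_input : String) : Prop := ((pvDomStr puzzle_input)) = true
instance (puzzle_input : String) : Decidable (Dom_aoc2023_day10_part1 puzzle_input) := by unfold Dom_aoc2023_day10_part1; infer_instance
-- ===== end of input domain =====

-- B is an ALTERNATIVE exact re-implementation: it drops A's adjacency dictionary and layered
-- frontier BFS and instead grows the visited region as a monotone fixpoint over mutual pipe
-- connections recomputed from the tiles, counting growth rounds (same value, not faster).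

-- ===== PORT A =====
-- the four tile-connection tests; BOTH Python sources contain these four ifs verbatim
def pvRules (x y : Int) (t : Char) : List (Int × Int) :=
  let adjacent : List (Int × Int) := []
  let adjacent := if PySem.Str.isIn (String.ofList [t]) "-J7S" then adjacent ++ [(x, y - 1)] else adjacent
  let adjacent := if PySem.Str.isIn (String.ofList [t]) "-FLS" then adjacent ++ [(x, y + 1)] else adjacent
  let adjacent := if PySem.Str.isIn (String.ofList [t]) "|F7S" then adjacent ++ [(x + 1, y)] else adjacent
  let adjacent := if PySem.Str.isIn (String.ofList [t]) "|LJS" then adjacent ++ [(x - 1, y)] else adjacent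
  adjacent

-- the grid-scanning loop of A: builds the graph dict and (visited, q) at the last 'S'
def pvBuildA (grid : List String) :
    PySem.Dict (Int × Int) (List (Int × Int)) ×
      Option (PySem.Set (Int × Int) × PySem.Set (Int × Int)) :=
  (PySem.List.enumerate grid 0).foldl (fun st p =>
    (PySem.List.enumerate p.2.toList 0).foldl (fun st q =>
      (st.1.insert (p.1, q.1) (pvRules p.1 q.1 q.2),
       if q.2 = 'S' then some (PySem.Set.ofList [(p.1, q.1)], PySem.Set.ofList [(p.1, q.1)])
       else st.2)) st)
    (PySem.Dict.empty, none)

-- one iteration of A's while-body: state (nxt, visited); graph[(x1,y1)] is ported as getD _ []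
-- (exact here: every element of q is a key of graph whenever the loop is reached)
def pvPassA (graph : PySem.Dict (Int × Int) (List (Int × Int)))
    (visited q : PySem.Set (Int × Int)) :
    PySem.Set (Int × Int) × PySem.Set (Int × Int) :=
  q.foldl (fun st v =>
    (graph.getD v []).foldl (fun st w =>
      if !(PySem.Set.contains st.2 w) && (graph.getD w []).contains v then
        (PySem.Set.add st.1 w, PySem.Set.add st.2 w)
      else st) st)
    (PySem.Set.empty, visited)


-- termination support for pvLoopA (cited in decreasing_by)
theorem pvInnerChar (graph : PySem.Dict (Int × Int) (List (Int × Int)))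
    (visited : PySem.Set (Int × Int)) (v : Int × Int) :
    ∀ (ws : List (Int × Int)) (st : PySem.Set (Int × Int) × PySem.Set (Int × Int)),
      st.2 = visited ++ st.1 →
      ((ws.foldl (fun st w =>
          if !(PySem.Set.contains st.2 w) && (graph.getD w []).contains v then
            (PySem.Set.add st.1 w, PySem.Set.add st.2 w)
          else st) st).2 =
        visited ++ (ws.foldl (fun st w =>
          if !(PySem.Set.contains st.2 w) && (graph.getD w []).contains v then
            (PySem.Set.add st.1 w, PySem.Set.add st.2 w)
          else st) st).1) ∧
      ∀ x, x ∈ (ws.foldl (fun st w =>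
          if !(PySem.Set.contains st.2 w) && (graph.getD w []).contains v then
            (PySem.Set.add st.1 w, PySem.Set.add st.2 w)
          else st) st).1 ↔
        x ∈ st.1 ∨ (x ∉ visited ∧ x ∈ ws ∧ v ∈ graph.getD x []) := by
  intro ws
  induction ws with
  | nil => intro st h; simpa using h
  | cons w ws ih =>
    intro st h
    simp only [List.foldl_cons]
    by_cases hc : (!(PySem.Set.contains st.2 w) && (graph.getD w []).contains v) = true
    · simp only [hc, if_true]
      have hw2 : w ∉ st.2 := by
        rcases Bool.and_eq_true_iff.1 hc with ⟨h1, _⟩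
        simp only [Bool.not_eq_true'] at h1
        intro hmem
        rw [PySem.Set.contains_eq_listContains] at h1
        simp at h1
        exact h1 hmem
      have hedge : v ∈ graph.getD w [] := by
        rcases Bool.and_eq_true_iff.1 hc with ⟨_, h2⟩
        simpa [List.contains_iff_mem] using h2
      have hw1 : w ∉ st.1 := fun hm => hw2 (by rw [h]; exact List.mem_append_right _ hm)
      have hwv : w ∉ visited := fun hm => hw2 (by rw [h]; exact List.mem_append_left _ hm)
      have hadd1 : PySem.Set.add st.1 w = st.1 ++ [w] := PySem.Set.add_of_not_mem hw1
      have hadd2 : PySem.Set.add st.2 w = st.2 ++ [w] := PySem.Set.add_of_not_mem hw2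
      have hinv : (PySem.Set.add st.1 w, PySem.Set.add st.2 w).2 =
          visited ++ (PySem.Set.add st.1 w, PySem.Set.add st.2 w).1 := by
        show st.2.add w = visited ++ (st.1.add w)
        rw [hadd1, hadd2, h, List.append_assoc]
      obtain ⟨hsnd, hmem⟩ := ih _ hinv
      refine ⟨hsnd, fun x => ?_⟩
      rw [hmem x]
      simp only [hadd1, List.mem_append, List.mem_cons, List.not_mem_nil, or_false]
      constructor
      · rintro ((hx | rfl) | ⟨hnv, hxs, he⟩)
        · exact Or.inl hx
        · exact Or.inr ⟨hwv, Or.inl rfl, hedge⟩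
        · exact Or.inr ⟨hnv, Or.inr hxs, he⟩
      · rintro (hx | ⟨hnv, (rfl | hxs), he⟩)
        · exact Or.inl (Or.inl hx)
        · exact Or.inl (Or.inr rfl)
        · exact Or.inr ⟨hnv, hxs, he⟩
    · rw [Bool.not_eq_true] at hc
      simp only [hc, Bool.false_eq_true, if_false]
      obtain ⟨hsnd, hmem⟩ := ih st h
      refine ⟨hsnd, fun x => ?_⟩
      rw [hmem x]
      have hor : w ∈ st.2 ∨ v ∉ graph.getD w [] := by
        by_cases h1 : w ∈ st.2
        · exact Or.inl h1
        · right
          intro hv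
          have e1 : PySem.Set.contains st.2 w = false := by
            rw [PySem.Set.contains_eq_listContains]; simpa using h1
          have e2 : (graph.getD w []).contains v = true := by simpa using hv
          rw [e1, e2] at hc
          simp at hc
      simp only [List.mem_cons]
      constructor
      · rintro (hx | ⟨hnv, hxs, he⟩)
        · exact Or.inl hx
        · exact Or.inr ⟨hnv, Or.inr hxs, he⟩
      · rintro (hx | ⟨hnv, (rfl | hxs), he⟩)
        · exact Or.inl hx
        · rcases hor with h1 | h1
          · rw [h] at h1
            rcases List.mem_append.1 h1 with h2 | h2
            · exact absurd h2 hnv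
            · exact Or.inl h2
          · exact absurd he h1
        · exact Or.inr ⟨hnv, hxs, he⟩

theorem pvOuterChar (graph : PySem.Dict (Int × Int) (List (Int × Int)))
    (visited : PySem.Set (Int × Int)) :
    ∀ (vs : List (Int × Int)) (st : PySem.Set (Int × Int) × PySem.Set (Int × Int)),
      st.2 = visited ++ st.1 →
      ((vs.foldl (fun st v => (graph.getD v []).foldl (fun st w =>
          if !(PySem.Set.contains st.2 w) && (graph.getD w []).contains v then
            (PySem.Set.add st.1 w, PySem.Set.add st.2 w)
          else st) st) st).2 =
        visited ++ (vs.foldl (fun st v => (graph.getD v []).foldl (fun st w =>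
          if !(PySem.Set.contains st.2 w) && (graph.getD w []).contains v then
            (PySem.Set.add st.1 w, PySem.Set.add st.2 w)
          else st) st) st).1) ∧
      ∀ x, x ∈ (vs.foldl (fun st v => (graph.getD v []).foldl (fun st w =>
          if !(PySem.Set.contains st.2 w) && (graph.getD w []).contains v then
            (PySem.Set.add st.1 w, PySem.Set.add st.2 w)
          else st) st) st).1 ↔
        x ∈ st.1 ∨ (x ∉ visited ∧ ∃ v ∈ vs, x ∈ graph.getD v [] ∧ v ∈ graph.getD x []) := by
  intro vs
  induction vs with
  | nil => intro st h; simpa using h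
  | cons v vs ih =>
    intro st h
    simp only [List.foldl_cons]
    obtain ⟨hsnd1, hmem1⟩ := pvInnerChar graph visited v (graph.getD v []) st h
    obtain ⟨hsnd, hmem⟩ := ih _ hsnd1
    refine ⟨hsnd, fun x => ?_⟩
    rw [hmem x, hmem1 x]
    constructor
    · rintro ((hx | ⟨hnv, hxs, he⟩) | ⟨hnv, u, hu, he1, he2⟩)
      · exact Or.inl hx
      · exact Or.inr ⟨hnv, v, List.mem_cons_self, hxs, he⟩
      · exact Or.inr ⟨hnv, u, List.mem_cons_of_mem _ hu, he1, he2⟩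
    · rintro (hx | ⟨hnv, u, hu, he1, he2⟩)
      · exact Or.inl (Or.inl hx)
      · rcases List.mem_cons.1 hu with rfl | hu'
        · exact Or.inl (Or.inr ⟨hnv, he1, he2⟩)
        · exact Or.inr ⟨hnv, u, hu', he1, he2⟩

-- pass characterization, phrased on pvPassA
theorem pvPassA_char (graph : PySem.Dict (Int × Int) (List (Int × Int)))
    (visited q : PySem.Set (Int × Int)) :
    (pvPassA graph visited q).2 = visited ++ (pvPassA graph visited q).1 ∧
      ∀ w, w ∈ (pvPassA graph visited q).1 ↔
        (w ∉ visited ∧ ∃ v ∈ q, w ∈ graph.getD v [] ∧ v ∈ graph.getD w []) := by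
  obtain ⟨hsnd, hmem⟩ := pvOuterChar graph visited q (PySem.Set.empty, visited) (by simp [PySem.Set.empty])
  unfold pvPassA
  refine ⟨hsnd, fun w => ?_⟩
  rw [hmem w]
  simp [PySem.Set.empty]

theorem pvCountP_strict {α : Type} (l : List α) (p p' : α → Bool)
    (hmono : ∀ a ∈ l, p' a = true → p a = true)
    (hx : ∃ a ∈ l, p a = true ∧ p' a = false) : l.countP p' < l.countP p := by
  induction l with
  | nil => simp at hx
  | cons a l ih =>
    obtain ⟨b, hb, hpb, hpb'⟩ := hx
    simp only [List.countP_cons]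
    rcases List.mem_cons.1 hb with rfl | hbl
    · have h1 : l.countP p' ≤ l.countP p :=
        List.countP_mono_left (fun a ha => hmono a (List.mem_cons_of_mem _ ha))
      simp [hpb, hpb']
      omega
    · have := ih (fun a ha => hmono a (List.mem_cons_of_mem _ ha)) ⟨b, hbl, hpb, hpb'⟩
      have h2 : (if p' a then 1 else 0) ≤ (if p a then 1 else 0) := by
        by_cases hpa : p' a = true
        · simp [hpa, hmono a List.mem_cons_self hpa]
        · have hf : p' a = false := by simpa using hpa
          simp [hf]
      omega

def pvMeasureA (graph : PySem.Dict (Int × Int) (List (Int × Int)))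
    (visited q : PySem.Set (Int × Int)) : Nat :=
  2 * (graph.keys.countP (fun k => !(PySem.Set.contains visited k))) +
    (if q.isEmpty then 0 else 1)

theorem pvMeasureA_dec (graph : PySem.Dict (Int × Int) (List (Int × Int)))
    (visited q : PySem.Set (Int × Int)) (hq : ¬ q.isEmpty = true) :
    pvMeasureA graph (pvPassA graph visited q).2 (pvPassA graph visited q).1 <
      pvMeasureA graph visited q := by
  obtain ⟨hsnd, hmem⟩ := pvPassA_char graph visited q
  unfold pvMeasureA
  rcases hr : (pvPassA graph visited q).1 with _ | ⟨w, rest⟩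
  · rw [hsnd, hr, List.append_nil]
    simp [hq]
  · have hw : w ∈ (pvPassA graph visited q).1 := by rw [hr]; exact List.mem_cons_self
    obtain ⟨hwv, v, hv, _, hvw⟩ := (hmem w).1 hw
    have hkey : w ∈ graph.keys := by
      rw [← PySem.Dict.contains_iff_mem_keys]
      cases hcc : graph.contains w
      · rw [PySem.Dict.getD_of_not_contains graph [] hcc] at hvw
        exact absurd hvw (List.not_mem_nil)
      · rfl
    have hstrict : graph.keys.countP (fun k => !(PySem.Set.contains (pvPassA graph visited q).2 k)) <
        graph.keys.countP (fun k => !(PySem.Set.contains visited k)) := by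
      apply pvCountP_strict
      · intro a _ ha
        simp only [Bool.not_eq_true'] at ha ⊢
        cases hca : PySem.Set.contains visited a
        · rfl
        · have : a ∈ visited := (PySem.Set.contains_iff _ _).1 hca
          have : a ∈ (pvPassA graph visited q).2 := by
            rw [hsnd]; exact List.mem_append_left _ this
          rw [(PySem.Set.contains_iff _ _).2 this] at ha
          exact ha
      · refine ⟨w, hkey, ?_, ?_⟩
        · simp only [Bool.not_eq_true']
          cases hca : PySem.Set.contains visited w
          · rfl
          · exact absurd ((PySem.Set.contains_iff _ _).1 hca) hwv
        · have hmem2 : w ∈ (pvPassA graph visited q).2 := by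
            rw [hsnd]; exact List.mem_append_right _ hw
          rw [(PySem.Set.contains_iff _ _).2 hmem2]
          rfl
    simp only [List.isEmpty_cons, Bool.false_eq_true, if_false, if_neg hq]
    omega

-- A's while loop
def pvLoopA (graph : PySem.Dict (Int × Int) (List (Int × Int)))
    (visited q : PySem.Set (Int × Int)) (steps : Int) : Int :=
  if h : q.isEmpty then steps
  else
    let r := pvPassA graph visited q
    pvLoopA graph r.2 r.1 (steps + 1)
termination_by pvMeasureA graph visited q
decreasing_by exact pvMeasureA_dec graph visited q h

def aoc2023_day10_part1 (puzzle_input : String) : Int :=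
  let grid := PySem.Str.split₀ puzzle_input
  let b := pvBuildA grid
  match b.2 with
  | none => 0   -- Python raises NameError here (no 'S'); excluded by Pre_
  | some vq => pvLoopA b.1 vq.1 vq.2 (-1)

-- ===== PORT B =====
-- neighbors(x, y) of Source B: bounds check, then the same four tile tests (pvRules)
def pvConnB (grid : List String) (x y : Int) : List (Int × Int) :=
  if (0 ≤ x && x < PySem.List.len grid)
      && (0 ≤ y && y < PySem.Str.len (PySem.List.pyGetD grid x "")) then
    -- indices are in range here, so pyGetD is exact
    pvRules x y (PySem.List.pyGetD (PySem.List.pyGetD grid x "").toList y ' ')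
  else []

-- the start-scanning loop of Source B (last 'S' wins)
def pvStartB (grid : List String) : Option (Int × Int) :=
  (PySem.List.enumerate grid 0).foldl (fun st p =>
    (PySem.List.enumerate p.2.toList 0).foldl (fun st q =>
      if q.2 = 'S' then some (p.1, q.1) else st) st) none

-- Source B's set comprehension (iterated as a set: only membership of the result matters)
def pvFreshB (grid : List String) (region : PySem.Set (Int × Int)) : PySem.Set (Int × Int) :=
  PySem.Set.ofList (region.flatMap (fun v =>
    (pvConnB grid v.1 v.2).filter (fun w =>
      !(PySem.Set.contains region w) && (pvConnB grid w.1 w.2).contains v)))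

-- termination support for pvGrowB (cited in decreasing_by)
def pvCells (grid : List String) : List (Int × Int) :=
  (PySem.List.enumerate grid 0).flatMap (fun p =>
    (PySem.List.enumerate p.2.toList 0).map (fun q => (p.1, q.1)))

theorem pvFreshB_mem (grid : List String) (region : PySem.Set (Int × Int))
    (w : Int × Int) (hw : w ∈ pvFreshB grid region) :
    w ∉ region ∧ w ∈ pvCells grid := by
  unfold pvFreshB at hw
  rw [PySem.Set.mem_ofList] at hw
  obtain ⟨v, hv, hwf⟩ := List.mem_flatMap.1 hw
  obtain ⟨hwc, hcond⟩ := List.mem_filter.1 hwf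
  obtain ⟨h1, h2⟩ := Bool.and_eq_true_iff.1 hcond
  have hwr : w ∉ region := by
    simp only [Bool.not_eq_true'] at h1
    intro hm
    rw [(PySem.Set.contains_iff _ _).2 hm] at h1
    exact absurd h1 (by simp)
  refine ⟨hwr, ?_⟩
  have hvw : v ∈ pvConnB grid w.1 w.2 := by simpa using h2
  have hbounds : ((0 ≤ w.1 && w.1 < PySem.List.len grid)
      && (0 ≤ w.2 && w.2 < PySem.Str.len (PySem.List.pyGetD grid w.1 ""))) = true := by
    by_contra hb
    rw [Bool.not_eq_true] at hb
    unfold pvConnB at hvw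
    rw [hb] at hvw
    simp at hvw
  obtain ⟨hb1, hb2⟩ := Bool.and_eq_true_iff.1 hbounds
  obtain ⟨hx0, hx1⟩ := Bool.and_eq_true_iff.1 hb1
  obtain ⟨hy0, hy1⟩ := Bool.and_eq_true_iff.1 hb2
  rw [decide_eq_true_iff] at hx0 hx1 hy0 hy1
  rw [PySem.List.len_eq] at hx1
  unfold pvCells
  apply List.mem_flatMap.2
  have hxlt : w.1.toNat < grid.length := by omega
  refine ⟨((w.1.toNat : Int), grid[w.1.toNat]), ?_, ?_⟩
  · rw [PySem.List.mem_enumerate_iff]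
    exact ⟨w.1.toNat, hxlt, by simp⟩
  · apply List.mem_map.2
    have hrow : PySem.List.pyGetD grid w.1 "" = grid[w.1.toNat] := by
      exact PySem.List.pyGetD_eq_getElem grid "" hx0 (by exact_mod_cast hx1)
    rw [hrow, PySem.Str.len_eq] at hy1
    have hylt : w.2.toNat < (grid[w.1.toNat] : String).toList.length := by
      have : (PySem.Str.len grid[w.1.toNat] : Int) = (grid[w.1.toNat] : String).toList.length := by
        simp [PySem.Str.len_eq]
      omega
    refine ⟨((w.2.toNat : Int), (grid[w.1.toNat] : String).toList[w.2.toNat]), ?_, ?_⟩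
    · rw [PySem.List.mem_enumerate_iff]
      exact ⟨w.2.toNat, hylt, by simp⟩
    · simp only []
      have heq : ((w.1.toNat : Int), (w.2.toNat : Int)) = w := by
        obtain ⟨a, b⟩ := w
        simp only [Prod.mk.injEq]
        exact ⟨by simp at hx0 ⊢; omega, by simp at hy0 ⊢; omega⟩
      simpa using heq

theorem pvMeasureB_dec (grid : List String) (region : PySem.Set (Int × Int))
    (h : ¬ (pvFreshB grid region).isEmpty = true) :
    (pvCells grid).countP
        (fun k => !(PySem.Set.contains (PySem.Set.union region (pvFreshB grid region)) k)) <
      (pvCells grid).countP (fun k => !(PySem.Set.contains region k)) := by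
  rcases hf : pvFreshB grid region with _ | ⟨w, rest⟩
  · rw [hf] at h; simp at h
  · have hw : w ∈ pvFreshB grid region := by rw [hf]; exact List.mem_cons_self
    obtain ⟨hwr, hwc⟩ := pvFreshB_mem grid region w hw
    rw [← hf]
    apply pvCountP_strict
    · intro a _ ha
      simp only [Bool.not_eq_true'] at ha ⊢
      cases hca : PySem.Set.contains region a
      · rfl
      · have : a ∈ PySem.Set.union region (pvFreshB grid region) :=
          (PySem.Set.mem_union _ _ _).2 (Or.inl ((PySem.Set.contains_iff _ _).1 hca))
        rw [(PySem.Set.contains_iff _ _).2 this] at ha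
        exact ha
    · refine ⟨w, hwc, ?_, ?_⟩
      · simp only [Bool.not_eq_true']
        cases hca : PySem.Set.contains region w
        · rfl
        · exact absurd ((PySem.Set.contains_iff _ _).1 hca) hwr
      · have hmem2 : w ∈ PySem.Set.union region (pvFreshB grid region) :=
          (PySem.Set.mem_union _ _ _).2 (Or.inr hw)
        rw [(PySem.Set.contains_iff _ _).2 hmem2]
        rfl

-- Source B's while-True fixpoint loop
def pvGrowB (grid : List String) (region : PySem.Set (Int × Int)) (rounds : Int) : Int :=
  let fresh := pvFreshB grid region
  if h : fresh.isEmpty then rounds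
  else pvGrowB grid (PySem.Set.union region fresh) (rounds + 1)
termination_by (pvCells grid).countP (fun k => !(PySem.Set.contains region k))
decreasing_by exact pvMeasureB_dec grid region h

def aoc2023_day10_part1_alt (puzzle_input : String) : Int :=
  let grid := PySem.Str.split₀ puzzle_input
  match pvStartB grid with
  | none => 0   -- Python raises TypeError here (no 'S'); excluded by Pre_
  | some s => pvGrowB grid (PySem.Set.ofList [s]) 0

-- ===== PRECONDITION & SPEC =====
-- Pre_ excludes exactly the inputs with no 'S' tile, on which A raises NameError
-- (UnboundLocalError) at `while q` and B raises TypeError at `neighbors(*None)`.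
def Pre_aoc2023_day10_part1 (puzzle_input : String) : Prop :=
  PySem.Str.isIn "S" puzzle_input = true
instance (puzzle_input : String) : Decidable (Pre_aoc2023_day10_part1 puzzle_input) := by
  unfold Pre_aoc2023_day10_part1; infer_instance

def pvWitness_aoc2023_day10_part1 : String := ".....\n.S-7.\n.|.|.\n.L-J.\n....."

def Spec_aoc2023_day10_part1 (puzzle_input : String) (out : Int) : Prop :=
  out = aoc2023_day10_part1_alt puzzle_input
instance (puzzle_input : String) (out : Int) : Decidable (Spec_aoc2023_day10_part1 puzzle_input out) := by
  unfold Spec_aoc2023_day10_part1; infer_instance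

-- ===== CLAIM (what is proved, stated in full; the proofs are below) =====
def Claim_equal_aoc2023_day10_part1 : Prop :=
  ∀ (puzzle_input : String), Dom_aoc2023_day10_part1 puzzle_input →
    Pre_aoc2023_day10_part1 puzzle_input →
      Spec_aoc2023_day10_part1 puzzle_input (aoc2023_day10_part1 puzzle_input)


-- ===== LEMMAS AND PROOFS =====

-- ---- the build fold splits into its two independent components ----
def pvGraphA (grid : List String) : PySem.Dict (Int × Int) (List (Int × Int)) :=
  (PySem.List.enumerate grid 0).foldl (fun d p =>
    (PySem.List.enumerate p.2.toList 0).foldl (fun d q =>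
      d.insert (p.1, q.1) (pvRules p.1 q.1 q.2)) d) PySem.Dict.empty

def pvVQA (grid : List String) :
    Option (PySem.Set (Int × Int) × PySem.Set (Int × Int)) :=
  (PySem.List.enumerate grid 0).foldl (fun o p =>
    (PySem.List.enumerate p.2.toList 0).foldl (fun o q =>
      if q.2 = 'S' then some (PySem.Set.ofList [(p.1, q.1)], PySem.Set.ofList [(p.1, q.1)])
      else o) o) none

theorem pvBuildSplit : ∀ (l : List (Int × String))
    (st : PySem.Dict (Int × Int) (List (Int × Int)) ×
      Option (PySem.Set (Int × Int) × PySem.Set (Int × Int))),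
    l.foldl (fun st p =>
      (PySem.List.enumerate p.2.toList 0).foldl (fun st q =>
        (st.1.insert (p.1, q.1) (pvRules p.1 q.1 q.2),
         if q.2 = 'S' then some (PySem.Set.ofList [(p.1, q.1)], PySem.Set.ofList [(p.1, q.1)])
         else st.2)) st) st =
    (l.foldl (fun d p =>
        (PySem.List.enumerate p.2.toList 0).foldl (fun d q =>
          d.insert (p.1, q.1) (pvRules p.1 q.1 q.2)) d) st.1,
     l.foldl (fun o p =>
        (PySem.List.enumerate p.2.toList 0).foldl (fun o q =>
          if q.2 = 'S' then some (PySem.Set.ofList [(p.1, q.1)], PySem.Set.ofList [(p.1, q.1)])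
          else o) o) st.2) := by
  intro l
  induction l with
  | nil => intro st; rfl
  | cons p l ih =>
    intro st
    simp only [List.foldl_cons]
    have hstep : (PySem.List.enumerate p.2.toList 0).foldl (fun st q =>
        (st.1.insert (p.1, q.1) (pvRules p.1 q.1 q.2),
         if q.2 = 'S' then some (PySem.Set.ofList [(p.1, q.1)], PySem.Set.ofList [(p.1, q.1)])
         else st.2)) st =
      ((PySem.List.enumerate p.2.toList 0).foldl (fun d q =>
          d.insert (p.1, q.1) (pvRules p.1 q.1 q.2)) st.1,
       (PySem.List.enumerate p.2.toList 0).foldl (fun o q =>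
          if q.2 = 'S' then some (PySem.Set.ofList [(p.1, q.1)], PySem.Set.ofList [(p.1, q.1)])
          else o) st.2) := by
      exact PySem.List.foldl_prod_mk
        (fun (d : PySem.Dict (Int × Int) (List (Int × Int))) (q : Int × Char) =>
          d.insert (p.1, q.1) (pvRules p.1 q.1 q.2))
        (fun (o : Option (PySem.Set (Int × Int) × PySem.Set (Int × Int))) (q : Int × Char) =>
          if q.2 = 'S' then some (PySem.Set.ofList [(p.1, q.1)], PySem.Set.ofList [(p.1, q.1)])
          else o)
        (PySem.List.enumerate p.2.toList 0) st.1 st.2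
    rw [hstep, ih]

theorem pvBuildA_eq (grid : List String) : pvBuildA grid = (pvGraphA grid, pvVQA grid) := by
  unfold pvBuildA pvGraphA pvVQA
  exact pvBuildSplit (PySem.List.enumerate grid 0) (PySem.Dict.empty, none)

-- ---- lookup characterization of the graph dict ----
def pvRowLook (x : Int) (cs : List Char) (s : Int) (k : Int × Int) :
    Option (List (Int × Int)) :=
  match cs with
  | [] => none
  | c :: rest => if k = (x, s) then some (pvRules x s c) else pvRowLook x rest (s + 1) k

def pvGridLook (rows : List String) (xr : Int) (k : Int × Int) :
    Option (List (Int × Int)) :=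
  match rows with
  | [] => none
  | r :: rest => (pvRowLook xr r.toList 0 k).or (pvGridLook rest (xr + 1) k)

theorem pvRowLook_none_snd (x : Int) : ∀ (cs : List Char) (s : Int) (k : Int × Int),
    k.2 < s → pvRowLook x cs s k = none := by
  intro cs
  induction cs with
  | nil => intro s k h; rfl
  | cons c rest ih =>
    intro s k h
    unfold pvRowLook
    rw [if_neg, ih (s + 1) k (by omega)]
    rintro rfl; simp at h

theorem pvRowLook_none_ge (x : Int) : ∀ (cs : List Char) (s : Int) (k : Int × Int),
    s + cs.length ≤ k.2 → pvRowLook x cs s k = none := by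
  intro cs
  induction cs with
  | nil => intro s k h; rfl
  | cons c rest ih =>
    intro s k h
    unfold pvRowLook
    rw [if_neg, ih (s + 1) k (by simp at h; omega)]
    rintro rfl; simp at h; omega

theorem pvRowLook_none_fst (x : Int) : ∀ (cs : List Char) (s : Int) (k : Int × Int),
    k.1 ≠ x → pvRowLook x cs s k = none := by
  intro cs
  induction cs with
  | nil => intro s k h; rfl
  | cons c rest ih =>
    intro s k h
    unfold pvRowLook
    rw [if_neg, ih (s + 1) k h]
    rintro rfl; simp at h

theorem pvRowLook_some (x : Int) : ∀ (cs : List Char) (s y : Int),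
    s ≤ y → (y - s).toNat < cs.length →
    pvRowLook x cs s (x, y) =
      some (pvRules x y ((cs[(y - s).toNat]?).getD ' ')) := by
  intro cs
  induction cs with
  | nil => intro s y h1 h2; simp at h2
  | cons c rest ih =>
    intro s y h1 h2
    unfold pvRowLook
    by_cases hy : y = s
    · subst hy
      rw [if_pos rfl]
      simp
    · have hsh : (y - s).toNat = (y - (s + 1)).toNat + 1 := by omega
      rw [if_neg (by simp [hy]), ih (s + 1) y (by omega) (by simp at h2; omega)]
      rw [hsh, List.getElem?_cons_succ]

theorem pvGridLook_none_lt : ∀ (rows : List String) (xr : Int) (k : Int × Int),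
    k.1 < xr → pvGridLook rows xr k = none := by
  intro rows
  induction rows with
  | nil => intro xr k h; rfl
  | cons r rest ih =>
    intro xr k h
    unfold pvGridLook
    rw [pvRowLook_none_fst xr r.toList 0 k (by omega), ih (xr + 1) k (by omega)]
    rfl

theorem pvGridLook_some : ∀ (rows : List String) (xr x y : Int),
    xr ≤ x → (x - xr).toNat < rows.length → 0 ≤ y →
    y.toNat < ((rows[(x - xr).toNat]?).getD "").toList.length →
    pvGridLook rows xr (x, y) =
      some (pvRules x y ((((rows[(x - xr).toNat]?).getD "").toList[y.toNat]?).getD ' ')) := by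
  intro rows
  induction rows with
  | nil => intro xr x y _ h _ _; simp at h
  | cons r rest ih =>
    intro xr x y hx0 hx1 hy0 hy1
    unfold pvGridLook
    by_cases hx : x = xr
    · subst hx
      simp only [Int.sub_self, Int.toNat_zero, List.getElem?_cons_zero, Option.getD_some] at hy1 ⊢
      rw [pvRowLook_some x r.toList 0 y hy0 (by simpa using hy1)]
      simp
    · have hsh : (x - xr).toNat = (x - (xr + 1)).toNat + 1 := by omega
      rw [hsh, List.getElem?_cons_succ] at hy1 ⊢
      rw [pvRowLook_none_fst xr r.toList 0 (x, y) (by simp [hx]),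
        ih (xr + 1) x y (by omega) (by simp at hx1; omega) hy0 hy1]
      rfl

theorem pvGridLook_none_oob : ∀ (rows : List String) (xr x y : Int),
    ¬(xr ≤ x ∧ (x - xr).toNat < rows.length ∧ 0 ≤ y ∧
        y.toNat < ((rows[(x - xr).toNat]?).getD "").toList.length) →
    pvGridLook rows xr (x, y) = none := by
  intro rows
  induction rows with
  | nil => intro xr x y _; rfl
  | cons r rest ih =>
    intro xr x y h
    unfold pvGridLook
    have hrow : pvRowLook xr r.toList 0 (x, y) = none := by
      by_cases hx : x = xr
      · subst hx
        by_cases hy0 : 0 ≤ y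
        · apply pvRowLook_none_ge
          simp only [Int.sub_self, Int.toNat_zero, List.getElem?_cons_zero, Option.getD_some] at h
          have hge : r.toList.length ≤ y.toNat := by
            by_contra hc
            exact h ⟨le_refl x, by simp only [List.length_cons]; omega, hy0, by omega⟩
          show (0 : Int) + (r.toList.length : Int) ≤ y
          omega
        · exact pvRowLook_none_snd x r.toList 0 (x, y) (by show y < (0:Int); omega)
      · exact pvRowLook_none_fst xr r.toList 0 (x, y) hx
    rw [hrow]
    by_cases hx : x < xr
    · rw [pvGridLook_none_lt rest (xr + 1) (x, y) (by simp; omega)]; rfl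
    · rw [ih (xr + 1) x y ?_]
      · rfl
      · rintro ⟨h1, h2, h3, h4⟩
        apply h
        have hsh : (x - xr).toNat = (x - (xr + 1)).toNat + 1 := by omega
        refine ⟨by omega, by simp [hsh]; omega, h3, ?_⟩
        rw [hsh, List.getElem?_cons_succ]
        exact h4

theorem pvRowFold_get? (x : Int) : ∀ (cs : List Char) (s : Int)
    (d : PySem.Dict (Int × Int) (List (Int × Int))) (k : Int × Int),
    ((PySem.List.enumerate cs s).foldl (fun d q =>
        d.insert (x, q.1) (pvRules x q.1 q.2)) d).get? k =
      (pvRowLook x cs s k).or (d.get? k) := by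
  intro cs
  induction cs with
  | nil => intro s d k; rfl
  | cons c rest ih =>
    intro s d k
    rw [PySem.List.enumerate_cons, List.foldl_cons, ih (s + 1) _ k]
    by_cases hk : k = (x, s)
    · subst hk
      rw [pvRowLook_none_snd x rest (s + 1) (x, s) (by simp)]
      rw [show pvRowLook x (c :: rest) s (x, s) = some (pvRules x s c) from by
        simp only [pvRowLook]; simp]
      simp [PySem.Dict.get?_insert_self]
    · rw [show pvRowLook x (c :: rest) s k = pvRowLook x rest (s + 1) k from by
        simp only [pvRowLook]; rw [if_neg hk]]
      rw [PySem.Dict.get?_insert_of_ne _ _ hk]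

theorem pvGridFold_get? : ∀ (rows : List String) (xr : Int)
    (d : PySem.Dict (Int × Int) (List (Int × Int))) (k : Int × Int),
    ((PySem.List.enumerate rows xr).foldl (fun d p =>
        (PySem.List.enumerate p.2.toList 0).foldl (fun d q =>
          d.insert (p.1, q.1) (pvRules p.1 q.1 q.2)) d) d).get? k =
      (pvGridLook rows xr k).or (d.get? k) := by
  intro rows
  induction rows with
  | nil => intro xr d k; rfl
  | cons r rest ih =>
    intro xr d k
    rw [PySem.List.enumerate_cons, List.foldl_cons, ih (xr + 1) _ k]
    rw [show pvGridLook (r :: rest) xr k =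
        (pvRowLook xr r.toList 0 k).or (pvGridLook rest (xr + 1) k) from by
      simp only [pvGridLook]]
    rw [pvRowFold_get? xr r.toList 0 d k]
    rcases hrl : pvRowLook xr r.toList 0 k with _ | v
    · simp
    · have hk1 : k.1 = xr := by
        by_contra hne
        rw [pvRowLook_none_fst xr r.toList 0 k hne] at hrl
        exact absurd hrl (by simp)
      rw [pvGridLook_none_lt rest (xr + 1) k (by omega)]
      simp

-- the central bridge: A's adjacency dict looks up exactly B's neighbour function
theorem pvConn_eq (grid : List String) (x y : Int) :
    (pvGraphA grid).getD (x, y) [] = pvConnB grid x y := by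
  rw [PySem.Dict.getD_eq_get?_getD]
  have hget : (pvGraphA grid).get? (x, y) = pvGridLook grid 0 (x, y) := by
    unfold pvGraphA
    rw [pvGridFold_get?]
    simp [PySem.Dict.get?_empty]
  rw [hget]
  unfold pvConnB
  by_cases hb : ((0 ≤ x && x < PySem.List.len grid)
      && (0 ≤ y && y < PySem.Str.len (PySem.List.pyGetD grid x ""))) = true
  · rw [if_pos hb]
    obtain ⟨hb1, hb2⟩ := Bool.and_eq_true_iff.1 hb
    obtain ⟨hx0, hx1⟩ := Bool.and_eq_true_iff.1 hb1
    obtain ⟨hy0, hy1⟩ := Bool.and_eq_true_iff.1 hb2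
    rw [decide_eq_true_iff] at hx0 hx1 hy0 hy1
    rw [PySem.List.len_eq] at hx1
    have hxlt : x.toNat < grid.length := by omega
    have hrow : PySem.List.pyGetD grid x "" = grid[x.toNat] :=
      PySem.List.pyGetD_eq_getElem grid "" hx0 (by exact_mod_cast hx1)
    rw [hrow, PySem.Str.len_eq] at hy1
    have hylt : y.toNat < (grid[x.toNat] : String).toList.length := by omega
    have hx0' : (x - 0).toNat = x.toNat := by omega
    have hget0 : (grid[(x - 0).toNat]?).getD "" = grid[x.toNat] := by
      rw [hx0', List.getElem?_eq_getElem hxlt]; rfl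
    rw [pvGridLook_some grid 0 x y hx0 (by omega) hy0 (by rw [hget0]; exact hylt)]
    rw [hget0]
    have htile : PySem.List.pyGetD (grid[x.toNat] : String).toList y ' ' =
        (grid[x.toNat] : String).toList[y.toNat] :=
      PySem.List.pyGetD_eq_getElem _ ' ' hy0 (by omega)
    rw [List.getElem?_eq_getElem hylt]
    simp [htile, hrow]
  · rw [if_neg hb]
    have hgl : pvGridLook grid 0 (x, y) = none := by
      apply pvGridLook_none_oob
      rintro ⟨h1, h2, h3, h4⟩
      apply hb
      have hx0' : (x - 0).toNat = x.toNat := by omega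
      rw [hx0'] at h2 h4
      have hrow : PySem.List.pyGetD grid x "" = grid[x.toNat] :=
        PySem.List.pyGetD_eq_getElem grid "" h1 (by omega)
      rw [List.getElem?_eq_getElem h2] at h4
      simp only [Option.getD_some] at h4
      simp only [Bool.and_eq_true, decide_eq_true_iff]
      refine ⟨⟨h1, ?_⟩, h3, ?_⟩
      · rw [PySem.List.len_eq]; omega
      · rw [hrow, PySem.Str.len_eq]; omega
    simp [hgl]

-- ---- the S-scan of A equals the start scan of B (mapped to the (visited, q) pair) ----
theorem pvVQInner : ∀ (l : List (Int × Char)) (xr : Int) (o : Option (Int × Int)),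
    l.foldl (fun o q =>
        if q.2 = 'S' then some (PySem.Set.ofList [(xr, q.1)], PySem.Set.ofList [(xr, q.1)])
        else o)
      (o.map (fun c => (PySem.Set.ofList [c], PySem.Set.ofList [c]))) =
    (l.foldl (fun o q => if q.2 = 'S' then some (xr, q.1) else o) o).map
      (fun c => (PySem.Set.ofList [c], PySem.Set.ofList [c])) := by
  intro l
  induction l with
  | nil => intro xr o; rfl
  | cons a l ih =>
    intro xr o
    simp only [List.foldl_cons]
    by_cases h : a.2 = 'S'
    · rw [if_pos h, if_pos h]
      exact ih xr (some (xr, a.1))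
    · rw [if_neg h, if_neg h]
      exact ih xr o

theorem pvVQOuter : ∀ (l : List (Int × String)) (o : Option (Int × Int)),
    l.foldl (fun o p =>
        (PySem.List.enumerate p.2.toList 0).foldl (fun o q =>
          if q.2 = 'S' then some (PySem.Set.ofList [(p.1, q.1)], PySem.Set.ofList [(p.1, q.1)])
          else o) o)
      (o.map (fun c => (PySem.Set.ofList [c], PySem.Set.ofList [c]))) =
    (l.foldl (fun o p =>
        (PySem.List.enumerate p.2.toList 0).foldl (fun o q =>
          if q.2 = 'S' then some (p.1, q.1) else o) o) o).map
      (fun c => (PySem.Set.ofList [c], PySem.Set.ofList [c])) := by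
  intro l
  induction l with
  | nil => intro o; rfl
  | cons p l ih =>
    intro o
    simp only [List.foldl_cons]
    rw [pvVQInner (PySem.List.enumerate p.2.toList 0) p.1 o]
    exact ih _

theorem pvVQA_eq (grid : List String) :
    pvVQA grid = (pvStartB grid).map (fun c => (PySem.Set.ofList [c], PySem.Set.ofList [c])) := by
  unfold pvVQA pvStartB
  exact pvVQOuter (PySem.List.enumerate grid 0) none

-- ---- if some row contains an 'S', B's start scan succeeds ----
theorem pvStartInner_ne : ∀ (l : List (Int × Char)) (xr : Int) (o : Option (Int × Int)),
    (o ≠ none ∨ ∃ a ∈ l, a.2 = 'S') →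
    l.foldl (fun o q => if q.2 = 'S' then some (xr, q.1) else o) o ≠ none := by
  intro l
  induction l with
  | nil =>
    intro xr o h
    rcases h with h | ⟨a, ha, _⟩
    · exact h
    · simp at ha
  | cons a l ih =>
    intro xr o h
    simp only [List.foldl_cons]
    apply ih
    rcases h with h | ⟨b, hb, hS⟩
    · left; by_cases hA : a.2 = 'S'
      · rw [if_pos hA]; simp
      · rw [if_neg hA]; exact h
    · rcases List.mem_cons.1 hb with rfl | hbl
      · left; rw [if_pos hS]; simp
      · right; exact ⟨b, hbl, hS⟩

theorem pvStartOuter_ne : ∀ (l : List (Int × String)) (o : Option (Int × Int)),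
    (o ≠ none ∨ ∃ p ∈ l, 'S' ∈ p.2.toList) →
    l.foldl (fun o p =>
        (PySem.List.enumerate p.2.toList 0).foldl (fun o q =>
          if q.2 = 'S' then some (p.1, q.1) else o) o) o ≠ none := by
  intro l
  induction l with
  | nil =>
    intro o h
    rcases h with h | ⟨pp, hpp, _⟩
    · exact h
    · simp at hpp
  | cons p l ih =>
    intro o h
    simp only [List.foldl_cons]
    apply ih
    rcases h with h | ⟨b, hb, hS⟩
    · left; exact pvStartInner_ne _ p.1 o (Or.inl h)
    · rcases List.mem_cons.1 hb with rfl | hbl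
      · left
        apply pvStartInner_ne _ b.1 o
        right
        obtain ⟨k, hk, hkS⟩ := List.mem_iff_getElem.1 hS
        refine ⟨((0 : Int) + k, b.2.toList[k]), ?_, hkS⟩
        rw [PySem.List.mem_enumerate_iff]
        exact ⟨k, hk, rfl⟩
      · right; exact ⟨b, hbl, hS⟩

theorem pvStartB_ne (grid : List String) (h : ∃ r ∈ grid, 'S' ∈ r.toList) :
    pvStartB grid ≠ none := by
  unfold pvStartB
  apply pvStartOuter_ne
  right
  obtain ⟨r, hr, hS⟩ := h
  obtain ⟨k, hk, rfl⟩ := List.mem_iff_getElem.1 hr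
  refine ⟨((0 : Int) + k, grid[k]), ?_, hS⟩
  rw [PySem.List.mem_enumerate_iff]
  exact ⟨k, hk, rfl⟩

-- ---- a non-whitespace char survives str.split() into some word ----
theorem pvSplitGo : ∀ (s cur : List Char) (acc : List (List Char)),
    ('S' ∈ cur ∨ (∃ w ∈ acc, 'S' ∈ w) ∨ 'S' ∈ s) →
    ∃ w ∈ PySem.Chars.split₀.go s cur acc, 'S' ∈ w := by
  intro s
  induction s with
  | nil =>
    intro cur acc h
    simp only [PySem.Chars.split₀.go]
    by_cases hc : cur.isEmpty = true
    · rw [if_pos hc]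
      rcases h with h | ⟨w, hw, hSw⟩ | h
      · rw [List.isEmpty_iff.1 hc] at h; simp at h
      · exact ⟨w, List.mem_reverse.2 hw, hSw⟩
      · simp at h
    · rw [if_neg hc]
      rcases h with h | ⟨w, hw, hSw⟩ | h
      · exact ⟨cur.reverse, List.mem_reverse.2 List.mem_cons_self, List.mem_reverse.2 h⟩
      · exact ⟨w, List.mem_reverse.2 (List.mem_cons_of_mem _ hw), hSw⟩
      · simp at h
  | cons c rest ih =>
    intro cur acc h
    simp only [PySem.Chars.split₀.go]
    by_cases hsp : PySem.Chars.isspace c = true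
    · rw [if_pos hsp]
      have hS : 'S' ∈ cur ∨ (∃ w ∈ acc, 'S' ∈ w) ∨ 'S' ∈ rest := by
        rcases h with h | h | h
        · exact Or.inl h
        · exact Or.inr (Or.inl h)
        · rcases List.mem_cons.1 h with hEq | h'
          · rw [← hEq] at hsp; exact absurd hsp (by decide)
          · exact Or.inr (Or.inr h')
      by_cases hc : cur.isEmpty = true
      · rw [if_pos hc]
        apply ih
        rcases hS with h' | h' | h'
        · rw [List.isEmpty_iff.1 hc] at h'; simp at h'
        · exact Or.inr (Or.inl h')
        · exact Or.inr (Or.inr h')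
      · rw [if_neg hc]
        apply ih
        rcases hS with h' | h' | h'
        · exact Or.inr (Or.inl ⟨cur.reverse, List.mem_cons_self, List.mem_reverse.2 h'⟩)
        · obtain ⟨w, hw, hSw⟩ := h'
          exact Or.inr (Or.inl ⟨w, List.mem_cons_of_mem _ hw, hSw⟩)
        · exact Or.inr (Or.inr h')
    · rw [if_neg hsp]
      apply ih
      rcases h with h | h | h
      · exact Or.inl (List.mem_cons_of_mem _ h)
      · exact Or.inr (Or.inl h)
      · rcases List.mem_cons.1 h with hEq | h'
        · exact Or.inl (List.mem_cons.2 (Or.inl hEq))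
        · exact Or.inr (Or.inr h')

theorem pvPreS (p : String) (h : Pre_aoc2023_day10_part1 p) :
    ∃ r ∈ PySem.Str.split₀ p, 'S' ∈ r.toList := by
  unfold Pre_aoc2023_day10_part1 at h
  rw [PySem.Str.isIn_iff_infix] at h
  have hS : 'S' ∈ p.toList := h.subset (by simp)
  obtain ⟨w, hw, hSw⟩ :=
    pvSplitGo p.toList [] [] (Or.inr (Or.inr hS))
  have hw' : w ∈ PySem.Chars.split₀ p.toList := hw
  rw [← PySem.Str.split₀_map_toList] at hw'
  obtain ⟨r, hr, rfl⟩ := List.mem_map.1 hw'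
  exact ⟨r, hr, hSw⟩

-- ---- membership characterization of B's comprehension ----
theorem pvFreshB_iff (grid : List String) (region : PySem.Set (Int × Int)) (x : Int × Int) :
    x ∈ pvFreshB grid region ↔
      x ∉ region ∧ ∃ v ∈ region, x ∈ pvConnB grid v.1 v.2 ∧ v ∈ pvConnB grid x.1 x.2 := by
  unfold pvFreshB
  rw [PySem.Set.mem_ofList, List.mem_flatMap]
  constructor
  · rintro ⟨v, hv, hxf⟩
    obtain ⟨hxc, hcond⟩ := List.mem_filter.1 hxf
    obtain ⟨h1, h2⟩ := Bool.and_eq_true_iff.1 hcond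
    refine ⟨?_, v, hv, hxc, by simpa using h2⟩
    simp only [Bool.not_eq_true'] at h1
    intro hm
    rw [(PySem.Set.contains_iff _ _).2 hm] at h1
    exact absurd h1 (by simp)
  · rintro ⟨hxr, v, hv, h1, h2⟩
    refine ⟨v, hv, List.mem_filter.2 ⟨h1, ?_⟩⟩
    apply Bool.and_eq_true_iff.2
    constructor
    · simp only [Bool.not_eq_true']
      cases hca : PySem.Set.contains region x
      · rfl
      · exact absurd ((PySem.Set.contains_iff _ _).1 hca) hxr
    · simpa using h2

-- ---- the lockstep argument: A's frontier BFS and B's region fixpoint agree ----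
theorem pvLockstep (grid : List String) (graph : PySem.Dict (Int × Int) (List (Int × Int)))
    (hG : ∀ k : Int × Int, graph.getD k [] = pvConnB grid k.1 k.2) :
    ∀ (visited q : PySem.Set (Int × Int)) (steps : Int),
      ∀ region : PySem.Set (Int × Int),
      q ≠ [] →
      (∀ x, x ∈ q → x ∈ visited) →
      (∀ v w : Int × Int, v ∈ visited → v ∉ q →
        w ∈ pvConnB grid v.1 v.2 → v ∈ pvConnB grid w.1 w.2 → w ∈ visited) →
      (∀ x, x ∈ visited ↔ x ∈ region) →
      pvLoopA graph visited q steps = pvGrowB grid region (steps + 1) := by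
  intro visited q steps
  induction visited, q, steps using pvLoopA.induct (graph := graph) with
  | case1 visited q steps hq =>
    intro region hne _ _ _
    exact absurd (List.isEmpty_iff.1 hq) hne
  | case2 visited q steps hq r ih =>
    intro region hne hsub hclosed hiff
    obtain ⟨hsnd, hmem⟩ := pvPassA_char graph visited q
    simp only [hG] at hmem
    have hfr : ∀ x, x ∈ pvFreshB grid region ↔ x ∈ (pvPassA graph visited q).1 := by
      intro x
      rw [pvFreshB_iff, hmem x]
      constructor
      · rintro ⟨hxr, v, hv, h1, h2⟩
        have hxv : x ∉ visited := fun hm => hxr ((hiff x).1 hm)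
        have hvv : v ∈ visited := (hiff v).2 hv
        by_cases hvq : v ∈ q
        · exact ⟨hxv, v, hvq, h1, h2⟩
        · exact absurd ((hiff x).1 (hclosed v x hvv hvq h1 h2)) hxr
      · rintro ⟨hxv, v, hv, h1, h2⟩
        exact ⟨fun hm => hxv ((hiff x).2 hm), v, (hiff v).1 (hsub v hv), h1, h2⟩
    have hsnd' : r.2 = visited ++ r.1 := hsnd
    have hmem' : ∀ w, w ∈ r.1 ↔
        (w ∉ visited ∧ ∃ v ∈ q, w ∈ pvConnB grid v.1 v.2 ∧ v ∈ pvConnB grid w.1 w.2) := hmem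
    have hfr' : ∀ x, x ∈ pvFreshB grid region ↔ x ∈ r.1 := hfr
    rw [pvLoopA, dif_neg hq, pvGrowB]
    by_cases hempty : r.1 = []
    · have hfe : pvFreshB grid region = [] := by
        rw [List.eq_nil_iff_forall_not_mem]
        intro x hx
        have hxr : x ∈ r.1 := (hfr' x).1 hx
        rw [hempty] at hxr
        simp at hxr
      rw [dif_pos (by rw [hfe]; rfl)]
      show pvLoopA graph r.2 r.1 (steps + 1) = steps + 1
      rw [pvLoopA, dif_pos (by rw [hempty]; rfl)]
    · have hfne : ¬ (pvFreshB grid region).isEmpty = true := by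
        obtain ⟨x, hx⟩ := List.exists_mem_of_ne_nil _ hempty
        intro hie
        have hxf : x ∈ pvFreshB grid region := (hfr' x).2 hx
        rw [List.isEmpty_iff.1 hie] at hxf
        simp at hxf
      rw [dif_neg hfne]
      show pvLoopA graph r.2 r.1 (steps + 1) =
        pvGrowB grid (PySem.Set.union region (pvFreshB grid region)) (steps + 1 + 1)
      apply ih (PySem.Set.union region (pvFreshB grid region)) hempty
      · intro x hx
        rw [hsnd']
        exact List.mem_append_right _ hx
      · intro v w hv hvq h1 h2
        rw [hsnd'] at hv ⊢
        rcases List.mem_append.1 hv with hvv | hvn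
        · by_cases hq' : v ∈ q
          · by_cases hwv : w ∈ visited
            · exact List.mem_append_left _ hwv
            · exact List.mem_append_right _ ((hmem' w).2 ⟨hwv, v, hq', h1, h2⟩)
          · exact List.mem_append_left _ (hclosed v w hvv hq' h1 h2)
        · exact absurd hvn hvq
      · intro x
        rw [hsnd', List.mem_append, PySem.Set.mem_union]
        rw [hiff x, hfr' x]

-- ===== VERDICT (by name: the statement is the Claim_ definition above) =====
theorem aoc2023_day10_part1_spec : Claim_equal_aoc2023_day10_part1 := by
  intro p _ hpre
  unfold Spec_aoc2023_day10_part1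
  obtain ⟨r0, hr0, hSr⟩ := pvPreS p hpre
  rcases hstart : pvStartB (PySem.Str.split₀ p) with _ | s
  · exact absurd hstart (pvStartB_ne _ ⟨r0, hr0, hSr⟩)
  · have hvq : pvVQA (PySem.Str.split₀ p) =
        some (PySem.Set.ofList [s], PySem.Set.ofList [s]) := by
      rw [pvVQA_eq, hstart]; rfl
    have hsingle : PySem.Set.ofList [s] = [s] :=
      PySem.Set.ofList_eq_self_of_nodup _ (List.nodup_singleton s)
    have h1 : (pvBuildA (PySem.Str.split₀ p)).2 = some ([s], [s]) := by
      rw [pvBuildA_eq]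
      show pvVQA (PySem.Str.split₀ p) = _
      rw [hvq, hsingle]
    have h2 : (pvBuildA (PySem.Str.split₀ p)).1 = pvGraphA (PySem.Str.split₀ p) := by
      rw [pvBuildA_eq]
    have hA : aoc2023_day10_part1 p =
        pvLoopA (pvGraphA (PySem.Str.split₀ p)) [s] [s] (-1) := by
      show (match (pvBuildA (PySem.Str.split₀ p)).2 with
            | none => (0 : Int)
            | some vq => pvLoopA (pvBuildA (PySem.Str.split₀ p)).1 vq.1 vq.2 (-1)) =
          pvLoopA (pvGraphA (PySem.Str.split₀ p)) [s] [s] (-1)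
      rw [h1, h2]
    have hB : aoc2023_day10_part1_alt p = pvGrowB (PySem.Str.split₀ p) [s] 0 := by
      show (match pvStartB (PySem.Str.split₀ p) with
            | none => (0 : Int)
            | some c => pvGrowB (PySem.Str.split₀ p) (PySem.Set.ofList [c]) 0) =
          pvGrowB (PySem.Str.split₀ p) [s] 0
      rw [hstart]
      show pvGrowB (PySem.Str.split₀ p) (PySem.Set.ofList [s]) 0 = _
      rw [hsingle]
    rw [hA, hB]
    have := pvLockstep (PySem.Str.split₀ p) (pvGraphA (PySem.Str.split₀ p))
      (fun k => pvConn_eq _ k.1 k.2) [s] [s] (-1) [s]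
      (by simp)
      (fun x hx => hx)
      (fun v w hv hnq _ _ => absurd hv hnq)
      (fun x => Iff.rfl)
    simpa using this
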